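-- pv_equiv track=rewrite | github.com/nodenson/deadlift-radio | analytics/readiness.py | classify_session
-- ===== SOURCE A (Python) =====
-- def classify_session(session) -> str:
--     names = [str(x).lower() for x in session.get("exercises", [])]
--     if not names:
--         return "other"
--     if any("deadlift" in n for n in names):
--         return "deadlift"
--     if sum(1 for n in names if any(k in n for k in (
--         "squat", "leg press", "leg curl", "romanian",
--         "rdl", "lunge", "hamstring", "quad", "calf"
--     ))) >= 2:
--         return "lower"
--     if any(any(k in n for k in (
--         "bench", "incline", "pushup", "dip", "chest press", "triceps"
--     )) for n in names):
--         return "bench"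
--     return "upper"
-- ===== SOURCE B (Python) =====
-- KEYWORDS = {
--     "deadlift": "deadlift",
--     "squat": "lower", "leg press": "lower", "leg curl": "lower",
--     "romanian": "lower", "rdl": "lower", "lunge": "lower",
--     "hamstring": "lower", "quad": "lower", "calf": "lower",
--     "bench": "bench", "incline": "bench", "pushup": "bench",
--     "dip": "bench", "chest press": "bench", "triceps": "bench",
-- }
--
--
-- def classify_session(session) -> str:
--     exercises = session.get("exercises", [])
--     if not exercises:
--         return "other"
--     counts = {}
--     for x in exercises:
--         n = str(x).lower()
--         for cat in {c for k, c in KEYWORDS.items() if k in n}: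
--             counts[cat] = counts.get(cat, 0) + 1
--     if counts.get("deadlift", 0):
--         return "deadlift"
--     if counts.get("lower", 0) >= 2:
--         return "lower"
--     if counts.get("bench", 0):
--         return "bench"
--     return "upper"
-- ===== Notes on version B (the rewrite author's own statement) =====
-- stated objective: alternative
-- what changed: Replaces A's three hardcoded priority scans with a table-driven classifier: one unified keyword-to-category table, one pass that tallies matched categories per name into a count dictionary, and a final decision read off that tally.
import Mathlib
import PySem

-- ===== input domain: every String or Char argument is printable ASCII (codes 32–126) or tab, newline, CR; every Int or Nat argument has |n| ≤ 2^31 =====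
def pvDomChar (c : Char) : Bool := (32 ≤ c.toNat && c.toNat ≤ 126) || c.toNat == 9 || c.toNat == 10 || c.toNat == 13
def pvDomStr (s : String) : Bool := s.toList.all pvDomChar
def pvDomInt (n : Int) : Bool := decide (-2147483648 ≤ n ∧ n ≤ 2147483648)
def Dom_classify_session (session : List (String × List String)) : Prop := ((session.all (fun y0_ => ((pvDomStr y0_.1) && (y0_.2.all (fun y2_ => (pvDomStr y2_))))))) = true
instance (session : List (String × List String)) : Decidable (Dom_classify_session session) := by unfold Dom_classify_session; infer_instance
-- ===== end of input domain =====

-- B replaces A's three hardcoded priority scans with a table-driven classifier: a single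
-- keyword→category table, one tallying pass into a category-count dictionary, then the
-- decision read off the tally; objective: alternative.

-- ===== PORT A =====
def kwLower : List String :=
  ["squat", "leg press", "leg curl", "romanian", "rdl", "lunge", "hamstring", "quad", "calf"]
def kwBench : List String :=
  ["bench", "incline", "pushup", "dip", "chest press", "triceps"]

def classify_session (session : List (String × List String)) : String :=
  let names := ((PySem.Dict.mk session).getD "exercises" []).map (fun x => PySem.Str.lower x)
  if names = [] then "other"
  else if names.any (fun n => PySem.Str.isIn "deadlift" n) then "deadlift"
  else if ((names.map (fun n => if kwLower.any (fun k => PySem.Str.isIn k n) then (1 : Int) else 0)).sum) ≥ 2 then "lower"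
  else if names.any (fun n => kwBench.any (fun k => PySem.Str.isIn k n)) then "bench"
  else "upper"

-- ===== PORT B =====
-- the unified keyword → category table of Source B (insertion order)
def kwTable : List (String × String) :=
  [("deadlift", "deadlift"),
   ("squat", "lower"), ("leg press", "lower"), ("leg curl", "lower"),
   ("romanian", "lower"), ("rdl", "lower"), ("lunge", "lower"),
   ("hamstring", "lower"), ("quad", "lower"), ("calf", "lower"),
   ("bench", "bench"), ("incline", "bench"), ("pushup", "bench"),
   ("dip", "bench"), ("chest press", "bench"), ("triceps", "bench")]

-- {c for k, c in KEYWORDS.items() if k in n}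
def catsOf (n : String) : PySem.Set String :=
  PySem.Set.ofList ((kwTable.filter (fun p => PySem.Str.isIn p.1 n)).map (·.2))

def classify_session_alt (session : List (String × List String)) : String :=
  let exercises := (PySem.Dict.mk session).getD "exercises" []
  if exercises = [] then "other"
  else
    let counts : PySem.Dict String Int :=
      exercises.foldl (fun d x =>
        (catsOf (PySem.Str.lower x)).foldl (fun d cat => d.insert cat (d.getD cat 0 + 1)) d)
        PySem.Dict.empty
    if counts.getD "deadlift" 0 ≠ 0 then "deadlift"
    else if counts.getD "lower" 0 ≥ 2 then "lower"
    else if counts.getD "bench" 0 ≠ 0 then "bench"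
    else "upper"

-- ===== PRECONDITION & SPEC =====
def Spec_classify_session (session : List (String × List String)) (out : String) : Prop := out = classify_session_alt session
instance (session : List (String × List String)) (out : String) : Decidable (Spec_classify_session session out) := by unfold Spec_classify_session; infer_instance

-- ===== CLAIM (what is proved, stated in full; the proofs are below) =====
def Claim_equal_classify_session : Prop := ∀ (session : List (String × List String)), Dom_classify_session session → Spec_classify_session session (classify_session session)

-- ===== LEMMAS AND PROOFS =====

-- tallying a list of exercises: the final count of category c is the number of names whose
-- category set contains c
lemma getD_tally (exs : List String) (d : PySem.Dict String Int) (c : String) :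
    (exs.foldl (fun d x =>
        (catsOf (PySem.Str.lower x)).foldl (fun d cat => d.insert cat (d.getD cat 0 + 1)) d)
        d).getD c 0
      = d.getD c 0 + ((exs.countP (fun x => decide (c ∈ catsOf (PySem.Str.lower x)))) : Int) := by
  induction exs generalizing d with
  | nil => simp
  | cons x xs ih =>
      rw [List.foldl_cons, ih, PySem.Dict.getD_foldl_insert_add_one, List.countP_cons]
      have hnd : (catsOf (PySem.Str.lower x)).Nodup := PySem.Set.nodup_ofList _
      by_cases hm : c ∈ catsOf (PySem.Str.lower x)
      · rw [List.count_eq_one_of_mem hnd hm]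
        simp only [hm, decide_true, if_pos]
        push_cast; ring
      · rw [List.count_eq_zero_of_not_mem hm]
        simp [hm]

-- membership of each category in a name's category set, in terms of A's keyword scans
lemma mem_cats_iff (n : String) (c : String) :
    c ∈ catsOf n ↔ ∃ p ∈ kwTable, PySem.Str.isIn p.1 n = true ∧ p.2 = c := by
  unfold catsOf
  rw [PySem.Set.mem_ofList]
  simp only [List.mem_map, List.mem_filter]
  constructor
  · rintro ⟨p, ⟨hp, hin⟩, hc⟩; exact ⟨p, hp, hin, hc⟩
  · rintro ⟨p, hp, hin, hc⟩; exact ⟨p, ⟨hp, hin⟩, hc⟩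

lemma cats_deadlift (n : String) :
    decide ("deadlift" ∈ catsOf n) = PySem.Str.isIn "deadlift" n := by
  have h : ("deadlift" ∈ catsOf n) ↔ (PySem.Str.isIn "deadlift" n = true) := by
    rw [mem_cats_iff]; simp [kwTable]
  rw [decide_eq_decide.mpr h, Bool.decide_eq_true]

lemma cats_lower (n : String) :
    decide ("lower" ∈ catsOf n) = kwLower.any (fun k => PySem.Str.isIn k n) := by
  have h : ("lower" ∈ catsOf n) ↔ (kwLower.any (fun k => PySem.Str.isIn k n) = true) := by
    rw [mem_cats_iff]; simp [kwTable, kwLower]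
  rw [decide_eq_decide.mpr h, Bool.decide_eq_true]

lemma cats_bench (n : String) :
    decide ("bench" ∈ catsOf n) = kwBench.any (fun k => PySem.Str.isIn k n) := by
  have h : ("bench" ∈ catsOf n) ↔ (kwBench.any (fun k => PySem.Str.isIn k n) = true) := by
    rw [mem_cats_iff]; simp [kwTable, kwBench]
  rw [decide_eq_decide.mpr h, Bool.decide_eq_true]

lemma sum_indicator_eq_countP (exs : List String) (p : String → Bool) :
    ((exs.map (fun x => if p x then (1 : Int) else 0)).sum) = (exs.countP p : Int) := by
  induction exs with
  | nil => simp
  | cons x xs ih =>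
      by_cases h : p x
      · simp [h, ih]; ring
      · simp [h, ih]

lemma any_iff_countP_ne {α : Type} (l : List α) (p : α → Bool) :
    (l.any p = true) ↔ ((l.countP p : Int) ≠ 0) := by
  rw [List.any_eq_true]
  constructor
  · rintro ⟨x, hx, hp⟩
    have := List.countP_pos_iff.mpr ⟨x, hx, hp⟩
    omega
  · intro h
    have : 0 < l.countP p := by omega
    exact List.countP_pos_iff.mp this

-- ===== VERDICT (by name: the statement is the Claim_ definition above) =====
theorem classify_session_spec : Claim_equal_classify_session := by
  intro session _
  unfold Spec_classify_session classify_session classify_session_alt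
  simp only [getD_tally, PySem.Dict.getD_empty, zero_add, List.map_eq_nil_iff,
    List.any_map, List.map_map, Function.comp_def]
  simp only [cats_deadlift, cats_lower, cats_bench, sum_indicator_eq_countP]
  by_cases he : (PySem.Dict.mk session).getD "exercises" [] = []
  · simp [he]
  · simp only [he, if_false, any_iff_countP_ne]
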